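-- pv_equiv track=rewrite | github.com/surya-gupta/best-prompts | code-review.py | _extract_patch_lines
-- ===== SOURCE A (Python) =====
-- from typing import Dict, List, Optional, TypedDict, Annotated
--
-- def _extract_patch_lines(patch: str) -> List[int]:
--     """Extract line numbers from git patch format"""
--     lines = []
--     current_line = 0
--
--     for line in patch.split('\n'):
--         if line.startswith('@@'):
--             # Parse hunk header: @@ -old_start,old_count +new_start,new_count @@
--             try:
--                 parts = line.split(' ')
--                 new_info = parts[2]  # +new_start,new_count
--                 new_start = int(new_info.split(',')[0][1:])  # Remove '+' and get start
--                 current_line = new_start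
--             except (IndexError, ValueError):
--                 continue
--         elif line.startswith('+') and not line.startswith('+++'):
--             # This is a new line
--             lines.append(current_line)
--             current_line += 1
--         elif not line.startswith('-'):
--             # Context line or unchanged line
--             current_line += 1
--
--     return lines
-- ===== SOURCE B (Python) =====
-- from typing import List
--
--
-- def _parse_new_start(header: str):
--     """Return new_start from a hunk header, or None if it does not parse."""
--     parts = header.split(' ')
--     if len(parts) < 3:
--         return None
--     tok = parts[2].split(',')[0][1:]
--     try:
--         return int(tok)
--     except ValueError:
--         return None
--
--
-- def _extract_patch_lines(patch: str) -> List[int]: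
--     # Group the patch into chunks: a headerless preamble chunk, then one
--     # chunk per '@@' header line with the body lines that follow it.
--     chunks = []
--     header, body = None, []
--     for ln in patch.split('\n'):
--         if ln.startswith('@@'):
--             chunks.append((header, body))
--             header, body = ln, []
--         else:
--             body.append(ln)
--     chunks.append((header, body))
--
--     result = []
--     counter = 0
--     for header, body in chunks:
--         if header is not None:
--             start = _parse_new_start(header)
--             if start is not None:
--                 counter = start
--         for ln in body:
--             if ln.startswith('+') and not ln.startswith('+++'):
--                 result.append(counter)
--                 counter += 1
--             elif not ln.startswith('-'):
--                 counter += 1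
--     return result
-- ===== Notes on version B (the rewrite author's own statement) =====
-- stated objective: alternative
-- what changed: A's single flat scan with one running counter is replaced by a two-level decomposition: the patch is first grouped into chunks (an optional '@@' header plus its body lines) and then each chunk is processed by parsing its header with a separate helper and walking its body lines.
import Mathlib
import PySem

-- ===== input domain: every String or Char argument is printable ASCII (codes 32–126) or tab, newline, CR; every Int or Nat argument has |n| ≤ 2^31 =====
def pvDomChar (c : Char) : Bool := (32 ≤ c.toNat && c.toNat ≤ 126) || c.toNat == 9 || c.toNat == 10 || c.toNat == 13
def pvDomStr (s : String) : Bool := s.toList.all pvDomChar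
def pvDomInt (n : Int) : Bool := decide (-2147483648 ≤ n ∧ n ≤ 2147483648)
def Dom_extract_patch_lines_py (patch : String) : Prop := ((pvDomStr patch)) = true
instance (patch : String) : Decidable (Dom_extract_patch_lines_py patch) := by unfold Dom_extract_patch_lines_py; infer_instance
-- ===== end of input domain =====

-- B regroups the flat scan into per-hunk chunks (header + body) first and then walks each
-- chunk; objective: alternative decomposition, same values, no speed claim.

-- ===== PORT A =====
-- patch.split('\\n') / line.split(' ') always have a nonempty separator, so split? is never none
-- and .getD [] is exact.
-- A's try-block: parts[2] may raise IndexError (-> none); new_info.split(',')[0] is the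
-- head of a never-empty split (pyGet? kept, none folded into the caught IndexError);
-- int(...) may raise ValueError (-> none).
def pvParseA (line : String) : Option Int :=
  let parts := (PySem.Str.split? line " ").getD []
  match PySem.List.pyGet? parts 2 with
  | none => none
  | some newInfo =>
    match PySem.List.pyGet? ((PySem.Str.split? newInfo ",").getD []) 0 with
    | none => none
    | some t => PySem.Int.ofStr? (PySem.Str.slice t (some 1) none)

def pvStepA (st : List Int × Int) (line : String) : List Int × Int :=
  if PySem.Str.startswith line "@@" then
    match pvParseA line with
    | some n => (st.1, n)
    | none => st
  else if PySem.Str.startswith line "+" && !PySem.Str.startswith line "+++" then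
    (st.1 ++ [st.2], st.2 + 1)
  else if !PySem.Str.startswith line "-" then
    (st.1, st.2 + 1)
  else st

def extract_patch_lines_py (patch : String) : List Int :=
  (((PySem.Str.split? patch "\n").getD []).foldl pvStepA ([], 0)).1

-- ===== PORT B =====
-- Source B's _parse_new_start; parts[2] is guarded by the length check (pyGetD exact there),
-- split(',')[0] is the head of a never-empty split.
def pvParseNewStart (header : String) : Option Int :=
  let parts := (PySem.Str.split? header " ").getD []
  if parts.length < 3 then none
  else
    PySem.Int.ofStr?
      (PySem.Str.slice (((PySem.Str.split? (PySem.List.pyGetD parts 2 "") ",").getD []).headD "")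
        (some 1) none)

-- one chunk-builder step of Source B's first loop: state (chunks, header, body)
def pvBuildStep (st : List (Option String × List String) × Option String × List String)
    (ln : String) : List (Option String × List String) × Option String × List String :=
  if PySem.Str.startswith ln "@@" then (st.1 ++ [(st.2.1, st.2.2)], some ln, [])
  else (st.1, st.2.1, st.2.2 ++ [ln])

-- Source B's inner body-line step
def pvBodyStep (st : List Int × Int) (ln : String) : List Int × Int :=
  if PySem.Str.startswith ln "+" && !PySem.Str.startswith ln "+++" then
    (st.1 ++ [st.2], st.2 + 1)
  else if !PySem.Str.startswith ln "-" then (st.1, st.2 + 1)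
  else st

-- Source B's per-chunk processing
def pvProcChunk (st : List Int × Int) (chunk : Option String × List String) :
    List Int × Int :=
  let st' :=
    match chunk.1 with
    | some h =>
      match pvParseNewStart h with
      | some s => (st.1, s)
      | none => st
    | none => st
  chunk.2.foldl pvBodyStep st'

-- the chunk list after Source B's first loop and the trailing append
def pvChunksOf (lines : List String) : List (Option String × List String) :=
  (lines.foldl pvBuildStep ([], none, [])).1 ++
    [((lines.foldl pvBuildStep ([], none, [])).2.1,
      (lines.foldl pvBuildStep ([], none, [])).2.2)]

def extract_patch_lines_py_alt (patch : String) : List Int :=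
  ((pvChunksOf ((PySem.Str.split? patch "\n").getD [])).foldl pvProcChunk ([], 0)).1

-- ===== PRECONDITION & SPEC =====
def Spec_extract_patch_lines_py (patch : String) (out : List Int) : Prop := out = extract_patch_lines_py_alt patch
instance (patch : String) (out : List Int) : Decidable (Spec_extract_patch_lines_py patch out) := by unfold Spec_extract_patch_lines_py; infer_instance

-- ===== CLAIM (what is proved, stated in full; the proofs are below) =====
def Claim_equal_extract_patch_lines_py : Prop := ∀ (patch : String), Dom_extract_patch_lines_py patch → Spec_extract_patch_lines_py patch (extract_patch_lines_py patch)

-- ===== LEMMAS AND PROOFS =====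

-- the chunk list Source B's first loop builds, as a structural recursion (proof-only)
def pvChunksRec (h : Option String) (b : List String) :
    List String → List (Option String × List String)
  | [] => [(h, b)]
  | l :: ls =>
    if PySem.Str.startswith l "@@" then (h, b) :: pvChunksRec (some l) [] ls
    else pvChunksRec h (b ++ [l]) ls

lemma pvBuild_eq (ls : List String) :
    ∀ (cs : List (Option String × List String)) (h : Option String) (b : List String),
      (ls.foldl pvBuildStep (cs, h, b)).1 ++
          [((ls.foldl pvBuildStep (cs, h, b)).2.1, (ls.foldl pvBuildStep (cs, h, b)).2.2)] =
        cs ++ pvChunksRec h b ls := by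
  induction ls with
  | nil => intro cs h b; simp [pvChunksRec]
  | cons l ls ih =>
    intro cs h b
    simp only [List.foldl_cons, pvBuildStep, pvChunksRec]
    split_ifs with hl <;> simp [ih]

lemma pvChunksOf_eq (ls : List String) : pvChunksOf ls = pvChunksRec none [] ls := by
  unfold pvChunksOf
  rw [pvBuild_eq ls [] none []]
  exact List.nil_append _

lemma pvParse_eq (line : String) : pvParseA line = pvParseNewStart line := by
  unfold pvParseA pvParseNewStart
  match hp : (PySem.Str.split? line " ").getD [] with
  | [] => simp [PySem.List.pyGet?, PySem.List.pyIdx?]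
  | [a] => simp [PySem.List.pyGet?, PySem.List.pyIdx?]
  | [a, b] => simp [PySem.List.pyGet?, PySem.List.pyIdx?]
  | a :: b :: c :: r =>
    have hle : (2 : Int) ≤ (r.length : Int) + 1 + 1 := by omega
    have h2 : PySem.List.pyGet? (a :: b :: c :: r) 2 = some c := by
      simp [PySem.List.pyGet?, PySem.List.pyIdx?, hle]
    have hd : PySem.List.pyGetD (a :: b :: c :: r) 2 "" = c := by
      simp [PySem.List.pyGetD, PySem.List.pyGet?, PySem.List.pyIdx?, hle]
    have hl : ¬ (a :: b :: c :: r).length < 3 := by simp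
    simp only [h2, hd, if_neg hl]
    match hy : (PySem.Str.split? c ",").getD [] with
    | [] => decide
    | y :: ys => simp [PySem.List.pyGet?, PySem.List.pyIdx?]

lemma pvStepA_at (st : List Int × Int) (l : String) :
    pvStepA st l =
      if PySem.Str.startswith l "@@" then pvProcChunk st (some l, [])
      else pvBodyStep st l := by
  unfold pvStepA pvProcChunk pvBodyStep
  by_cases hl : PySem.Str.startswith l "@@" = true
  · simp only [hl, if_true, List.foldl_nil, pvParse_eq l]
  · simp only [hl, if_false, Bool.false_eq_true]

lemma pvMain (ls : List String) :
    ∀ (h : Option String) (b : List String) (st : List Int × Int),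
      (pvChunksRec h b ls).foldl pvProcChunk st = ls.foldl pvStepA (pvProcChunk st (h, b)) := by
  induction ls with
  | nil => intro h b st; simp [pvChunksRec]
  | cons l ls ih =>
    intro h b st
    simp only [pvChunksRec, List.foldl_cons]
    by_cases hl : PySem.Str.startswith l "@@" = true
    · rw [if_pos hl, List.foldl_cons, ih, pvStepA_at, if_pos hl]
    · rw [if_neg hl, ih, pvStepA_at, if_neg hl]
      have : pvProcChunk st (h, b ++ [l]) = pvBodyStep (pvProcChunk st (h, b)) l := by
        unfold pvProcChunk
        simp only [List.foldl_append, List.foldl_cons, List.foldl_nil]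
      rw [this]

-- ===== VERDICT (by name: the statement is the Claim_ definition above) =====
theorem extract_patch_lines_py_spec : Claim_equal_extract_patch_lines_py := by
  intro patch _
  unfold Spec_extract_patch_lines_py extract_patch_lines_py extract_patch_lines_py_alt
  rw [pvChunksOf_eq, pvMain]
  rfl
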